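-- pv_equiv track=rewrite | github.com/supersciencegrl/AoC | 2024/day10.py | take_step
-- ===== SOURCE A (Python) =====
-- def take_step(grid, current_posn):
--     x, y = current_posn
--     score = 0
--     elevation = int(grid[y][x])
--
--     if elevation == 9: # Summit
--         score += 1
--
--     for delta_x, delta_y in directions:
--         next_x = x + delta_x
--         next_y = y + delta_y
--
--         in_grid = (0 <= next_x < len(grid[0]) and 0 <= next_y < len(grid))
--
--         if in_grid and int(grid[next_y][next_x]) == elevation + 1:
--             return take_step(grid, (next_x, next_y))
--
--     return score
--
-- directions = [(-1, 0),
--               (0, -1),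
--               (1, 0),
--               (0, 1)
--               ]
-- ===== SOURCE B (Python) =====
-- def take_step(grid, current_posn):
--     directions = [(-1, 0), (0, -1), (1, 0), (0, 1)]
--     x, y = current_posn
--     e = int(grid[y][x])
--     while True:
--         candidates = [(x + dx, y + dy) for dx, dy in directions]
--         step = next((q for q in candidates
--                      if 0 <= q[0] < len(grid[0]) and 0 <= q[1] < len(grid)
--                      and int(grid[q[1]][q[0]]) == e + 1), None)
--         if step is None:
--             return 1 if e == 9 else 0
--         x, y = step
--         e += 1
-- ===== Notes on version B (the rewrite author's own statement) =====
-- stated objective: alternative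
-- what changed: Replaces A's self-recursion (rereading int(grid[y][x]) at every visited cell and scoring before the scan) with an iterative walk that reads the start elevation once and then carries an elevation counter, picking the next cell as the first match of a generator over the four precomputed neighbor candidates, and returning 1 iff the final counter is 9.
-- outside the precondition, e.g. on take_step(['1234', '9999', 'x999'], (0, 0)): A returns 0, B returns 0
import Mathlib
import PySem

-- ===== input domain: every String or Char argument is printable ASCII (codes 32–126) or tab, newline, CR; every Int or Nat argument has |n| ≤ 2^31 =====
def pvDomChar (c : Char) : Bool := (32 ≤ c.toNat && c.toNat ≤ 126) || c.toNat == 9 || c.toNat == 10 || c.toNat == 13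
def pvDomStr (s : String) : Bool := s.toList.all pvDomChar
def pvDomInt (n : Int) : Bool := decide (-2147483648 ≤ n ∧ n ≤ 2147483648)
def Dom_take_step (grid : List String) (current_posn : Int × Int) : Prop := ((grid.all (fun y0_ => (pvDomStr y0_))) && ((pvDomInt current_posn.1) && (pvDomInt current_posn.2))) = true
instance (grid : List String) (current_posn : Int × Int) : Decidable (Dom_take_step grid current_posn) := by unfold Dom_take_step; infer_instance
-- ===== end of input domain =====

-- B replaces A's recursion (which rereads the current cell each call) by an iterative walk
-- carrying an elevation counter and picking the step by a first-match search over the four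
-- neighbor candidates; same value on every admitted input.

-- ===== PORT A =====
def pvDirections : List (Int × Int) := [(-1, 0), (0, -1), (1, 0), (0, 1)]

-- int(grid[y][x]); `.getD 0` only fires outside Pre_ (missing row/char or non-digit → Python raises).
def pvElev (grid : List String) (x y : Int) : Int :=
  ((PySem.List.pyGet? grid y).bind (fun row =>
    (PySem.Str.pyGet? row x).bind (fun c => PySem.Int.ofChars? [c]))).getD 0

-- the `for delta_x, delta_y in directions:` scan: first in-grid neighbor whose cell reads elevation+1
def pvFirstStep (grid : List String) (x y e : Int) : List (Int × Int) → Option (Int × Int)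
  | [] => none
  | (dx, dy) :: rest =>
    let nx := x + dx
    let ny := y + dy
    let w : Int := PySem.Str.len ((PySem.List.pyGet? grid 0).getD "")
    if (0 ≤ nx ∧ nx < w ∧ 0 ≤ ny ∧ ny < (grid.length : Int)) ∧ pvElev grid nx ny = e + 1 then
      some (nx, ny)
    else
      pvFirstStep grid x y e rest

-- A's recursion, totalised with fuel 11 (elevations are digits and strictly increase, so
-- at most 10 cells are ever visited; fuel is a totalisation guard only).
def pvWalkA (grid : List String) : Nat → Int × Int → Int
  | 0, _ => 0
  | f + 1, (x, y) =>
    let elevation := pvElev grid x y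
    let score : Int := if elevation = 9 then 1 else 0
    match pvFirstStep grid x y elevation pvDirections with
    | some p => pvWalkA grid f p
    | none => score

def take_step (grid : List String) (current_posn : Int × Int) : Int :=
  pvWalkA grid 11 current_posn

-- ===== PORT B =====
-- B's read of int(grid[q[1]][q[0]]), totalised with 0 exactly like A's (outside Pre_ Python raises).
def altRead (grid : List String) (q : Int × Int) : Int :=
  match PySem.List.pyGet? grid q.2 with
  | none => 0
  | some row =>
    match PySem.Str.pyGet? row q.1 with
    | none => 0
    | some c => (PySem.Int.ofChars? [c]).getD 0

-- B's `next(...)`: first of the four precomputed candidates that is in-grid and reads e+1.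
def altNext (grid : List String) (e : Int) (p : Int × Int) : Option (Int × Int) :=
  (([(-1, 0), (0, -1), (1, 0), (0, 1)] : List (Int × Int)).map
      (fun d => (p.1 + d.1, p.2 + d.2))).find?
    (fun q =>
      decide (0 ≤ q.1) &&
      decide (q.1 < PySem.Str.len ((PySem.List.pyGet? grid 0).getD "")) &&
      decide (0 ≤ q.2) && decide (q.2 < (grid.length : Int)) &&
      decide (altRead grid q = e + 1))

-- B's while-loop carrying the elevation counter; same fuel-11 totalisation guard (none = ran out).
def altWalk (grid : List String) (fuel : Nat) (e : Int) (p : Int × Int) : Option Int :=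
  match fuel with
  | 0 => none
  | f + 1 =>
    match altNext grid e p with
    | none => some e
    | some q => altWalk grid f (e + 1) q

def take_step_alt (grid : List String) (current_posn : Int × Int) : Int :=
  match altWalk grid 11 (altRead grid current_posn) current_posn with
  | some e => if e == 9 then 1 else 0
  | none => 0

-- ===== PRECONDITION & SPEC =====
-- Pre_ excludes exactly inputs on which Python A raises (ValueError/IndexError on an int() of a
-- missing or non-digit cell), via a sufficient closed-form safety condition: the start cell (with
-- Python's negative-index wrap) is a digit, and either (a) every cell of the scanned rectangle
-- [0,len(grid[0])) x [0,len(grid)) is a digit (all rows all-digit and at least as long as row 0),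
-- or (b) each of the start's in-rectangle neighbors is a digit and none reads elevation+1, so A
-- returns after scanning only those.  Whether A raises in general depends on the path walked, so
-- this also excludes some inputs A returns on (a non-digit cell the walk never scans); both
-- programs return the same value there.
def pvPreCheck (grid : List String) (x y : Int) : Bool :=
  match (PySem.List.pyGet? grid y).bind (fun row => PySem.Str.pyGet? row x) with
  | none => false
  | some c0 =>
    c0.isDigit &&
    (let w : Int := ((grid.headD "").toList.length : Int)
     let h : Int := (grid.length : Int)
     ((grid.all fun row =>
         decide (w ≤ (row.toList.length : Int)) && row.toList.all Char.isDigit)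
      ||
      (([(x - 1, y), (x, y - 1), (x + 1, y), (x, y + 1)].filter
          (fun q => decide (0 ≤ q.1) && decide (q.1 < w) && decide (0 ≤ q.2) && decide (q.2 < h))).all
        (fun q =>
          match (PySem.List.pyGet? grid q.2).bind (fun row => PySem.Str.pyGet? row q.1) with
          | none => false
          | some c => c.isDigit && c.toNat != c0.toNat + 1))))

def Pre_take_step (grid : List String) (current_posn : Int × Int) : Prop :=
  pvPreCheck grid current_posn.1 current_posn.2 = true
instance (grid : List String) (current_posn : Int × Int) : Decidable (Pre_take_step grid current_posn) := by
  unfold Pre_take_step; infer_instance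

def pvWitness_take_step : List String × (Int × Int) := (["0"], (0, 0))

def Spec_take_step (grid : List String) (current_posn : Int × Int) (out : Int) : Prop := out = take_step_alt grid current_posn
instance (grid : List String) (current_posn : Int × Int) (out : Int) : Decidable (Spec_take_step grid current_posn out) := by unfold Spec_take_step; infer_instance

-- ===== CLAIM (what is proved, stated in full; the proofs are below) =====
def Claim_equal_take_step : Prop := ∀ (grid : List String) (current_posn : Int × Int), Dom_take_step grid current_posn → Pre_take_step grid current_posn → Spec_take_step grid current_posn (take_step grid current_posn)

-- ===== LEMMAS AND PROOFS =====
-- B's totalised cell read equals A's, for every input.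
theorem altRead_eq_pvElev (grid : List String) (q : Int × Int) :
    altRead grid q = pvElev grid q.1 q.2 := by
  unfold altRead pvElev
  cases h1 : PySem.List.pyGet? grid q.2 with
  | none => rfl
  | some row =>
    cases h2 : PySem.List.pyGet? row.toList q.1 <;>
      simp [PySem.Str.pyGet?, h2]

-- the Bool predicate of B's find? decides exactly A's step condition
theorem altCond_iff (grid : List String) (e a b : Int) :
    ((decide (0 ≤ a) &&
      decide (a < PySem.Str.len ((PySem.List.pyGet? grid 0).getD "")) &&
      decide (0 ≤ b) && decide (b < (grid.length : Int)) &&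
      decide (altRead grid (a, b) = e + 1)) = true) ↔
    ((0 ≤ a ∧ a < PySem.Str.len ((PySem.List.pyGet? grid 0).getD "") ∧
      0 ≤ b ∧ b < (grid.length : Int)) ∧ pvElev grid a b = e + 1) := by
  simp [altRead_eq_pvElev grid (a, b), and_assoc]

-- B's first-match search over the four candidates equals A's scan of `directions`.
theorem altNext_eq_pvFirstStep (grid : List String) (x y e : Int) :
    altNext grid e (x, y) = pvFirstStep grid x y e pvDirections := by
  simp only [altNext, pvDirections, List.map, List.find?_cons, List.find?_nil]
  simp only [pvFirstStep]
  cases hb1 : (decide (0 ≤ x + -1) &&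
      decide (x + -1 < PySem.Str.len ((PySem.List.pyGet? grid 0).getD "")) &&
      decide (0 ≤ y + 0) && decide (y + 0 < (grid.length : Int)) &&
      decide (altRead grid (x + -1, y + 0) = e + 1)) with
  | true => simp only [if_pos ((altCond_iff grid e (x + -1) (y + 0)).1 hb1)]
  | false =>
    simp only [if_neg (fun hp => absurd ((altCond_iff grid e (x + -1) (y + 0)).2 hp) (by rw [hb1]; decide))]
    cases hb2 : (decide (0 ≤ x + 0) &&
        decide (x + 0 < PySem.Str.len ((PySem.List.pyGet? grid 0).getD "")) &&
        decide (0 ≤ y + -1) && decide (y + -1 < (grid.length : Int)) &&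
        decide (altRead grid (x + 0, y + -1) = e + 1)) with
    | true => simp only [if_pos ((altCond_iff grid e (x + 0) (y + -1)).1 hb2)]
    | false =>
      simp only [if_neg (fun hp => absurd ((altCond_iff grid e (x + 0) (y + -1)).2 hp) (by rw [hb2]; decide))]
      cases hb3 : (decide (0 ≤ x + 1) &&
          decide (x + 1 < PySem.Str.len ((PySem.List.pyGet? grid 0).getD "")) &&
          decide (0 ≤ y + 0) && decide (y + 0 < (grid.length : Int)) &&
          decide (altRead grid (x + 1, y + 0) = e + 1)) with
      | true => simp only [if_pos ((altCond_iff grid e (x + 1) (y + 0)).1 hb3)]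
      | false =>
        simp only [if_neg (fun hp => absurd ((altCond_iff grid e (x + 1) (y + 0)).2 hp) (by rw [hb3]; decide))]
        cases hb4 : (decide (0 ≤ x + 0) &&
            decide (x + 0 < PySem.Str.len ((PySem.List.pyGet? grid 0).getD "")) &&
            decide (0 ≤ y + 1) && decide (y + 1 < (grid.length : Int)) &&
            decide (altRead grid (x + 0, y + 1) = e + 1)) with
        | true => simp only [if_pos ((altCond_iff grid e (x + 0) (y + 1)).1 hb4)]
        | false =>
          simp only [if_neg (fun hp => absurd ((altCond_iff grid e (x + 0) (y + 1)).2 hp) (by rw [hb4]; decide))]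

-- a successful step of A's scan lands on a cell reading e + 1
theorem pvFirstStep_elev (grid : List String) (x y e nx ny : Int) :
    ∀ ds : List (Int × Int), pvFirstStep grid x y e ds = some (nx, ny) →
      pvElev grid nx ny = e + 1 := by
  intro ds
  induction ds with
  | nil => intro h; exact absurd h (by simp [pvFirstStep])
  | cons d rest ih =>
    obtain ⟨dx, dy⟩ := d
    simp only [pvFirstStep]
    split
    · intro h
      injection h with h'
      injection h' with h1 h2
      subst h1; subst h2
      simp_all
    · exact ih

-- The two walks agree at every fuel, given that the carried counter e is the current elevation:
-- A returns `1 iff the stuck elevation is 9`, which B reads off the final counter.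
theorem pvWalk_agree (grid : List String) :
    ∀ (f : Nat) (x y e : Int), e = pvElev grid x y →
      pvWalkA grid f (x, y) =
        match altWalk grid f e (x, y) with
        | some e' => if e' == 9 then (1 : Int) else 0
        | none => 0 := by
  intro f
  induction f with
  | zero => intro x y e _; simp [pvWalkA, altWalk]
  | succ f ih =>
    intro x y e he
    simp only [pvWalkA, altWalk, he, altNext_eq_pvFirstStep]
    cases h : pvFirstStep grid x y (pvElev grid x y) pvDirections with
    | none => simp [beq_iff_eq]
    | some p =>
      cases p with
      | mk nx ny =>
        have hp : pvElev grid nx ny = pvElev grid x y + 1 :=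
          pvFirstStep_elev grid x y (pvElev grid x y) nx ny pvDirections h
        simp [ih nx ny (pvElev grid x y + 1) hp.symm]

-- ===== VERDICT (by name: the statement is the Claim_ definition above) =====
theorem take_step_spec : Claim_equal_take_step := by
  intro grid current_posn _ _
  unfold Spec_take_step take_step take_step_alt
  obtain ⟨x, y⟩ := current_posn
  exact pvWalk_agree grid 11 x y _ (altRead_eq_pvElev grid (x, y))
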